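-- pv_equiv track=rewrite | github.com/miliar/Code_Jam_Webscraper | solutions_python/solutions_year17_round0_nr3/342.py | get_kc
-- ===== SOURCE A (Python) =====
-- def get_kc(K):
--     i = 2
--     table = [1]
--     while True:
--         add = 2**i - 1
--         if add >= K:
--             break
--         table.append(add)
--         i += 1
--     return table[-1]
-- ===== SOURCE B (Python) =====
-- def get_kc(K):
--     if K < 4:
--         return 1
--     return 2 ** (K.bit_length() - 1) - 1
-- ===== Notes on version B (the rewrite author's own statement) =====
-- stated objective: simpler
-- what changed: Replaced the upward table-building loop with a closed form: 1 for K < 4, otherwise 2**(K.bit_length()-1)-1, the largest 2^i-1 strictly below K.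
import Mathlib
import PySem

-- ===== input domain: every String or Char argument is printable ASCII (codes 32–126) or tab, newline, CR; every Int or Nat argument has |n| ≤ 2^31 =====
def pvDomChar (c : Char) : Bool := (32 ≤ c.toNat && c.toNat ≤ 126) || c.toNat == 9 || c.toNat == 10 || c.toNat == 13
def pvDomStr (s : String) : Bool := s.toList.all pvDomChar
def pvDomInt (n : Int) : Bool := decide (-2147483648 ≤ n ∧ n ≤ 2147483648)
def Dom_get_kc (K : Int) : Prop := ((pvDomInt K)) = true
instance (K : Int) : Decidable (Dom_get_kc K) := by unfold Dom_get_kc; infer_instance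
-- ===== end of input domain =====

-- B replaces A's upward table-building loop by a closed form (bit_length); same value everywhere.

-- ===== PORT A =====
-- A's while loop: builds table, i starts at 2; terminates because 2^i grows past K.
def get_kc_loop (K : Int) (i : Nat) (table : List Int) : List Int :=
  let add : Int := 2 ^ i - 1
  if add ≥ K then table
  else get_kc_loop K (i + 1) (table ++ [add])
termination_by (K - (2 ^ i - 1)).toNat
decreasing_by
  have h1 : (2:Int) ^ i < 2 ^ (i + 1) := by
    have := pow_lt_pow_right₀ (a := (2:Int)) (by norm_num) (Nat.lt_succ_self i)
    exact this
  omega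

-- return table[-1]: the table always holds [1] at least, so Python never raises; .getD 0 is unreachable
def get_kc (K : Int) : Int :=
  ((PySem.List.pyGet? (get_kc_loop K 2 [1]) (-1)).getD 0)

-- ===== PORT B =====
-- closed form: 1 for K < 4, else 2^(bit_length(K)-1) - 1; bit_length of positive K is Nat.size
def get_kc_alt (K : Int) : Int :=
  if K < 4 then 1
  else 2 ^ (K.toNat.size - 1) - 1

-- ===== PRECONDITION & SPEC =====
def Spec_get_kc (K : Int) (out : Int) : Prop := out = get_kc_alt K
instance (K : Int) (out : Int) : Decidable (Spec_get_kc K out) := by unfold Spec_get_kc; infer_instance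

-- ===== CLAIM (what is proved, stated in full; the proofs are below) =====
def Claim_equal_get_kc : Prop := ∀ (K : Int), Dom_get_kc K → Spec_get_kc K (get_kc K)

-- ===== LEMMAS AND PROOFS =====

theorem pow_cast_int (i : Nat) : ((2 ^ i : Nat) : Int) = 2 ^ i := by push_cast; ring

-- the loop, entered with 2^i ≤ K, ends with last element 2^(size K.toNat - 1) - 1
theorem get_kc_loop_last (K : Int) (n : Nat) :
    ∀ (i : Nat) (table : List Int), (2:Int) ^ i ≤ K → K.toNat.size - 1 - i = n →
    (get_kc_loop K i table).getLast? = some (2 ^ (K.toNat.size - 1) - 1) := by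
  induction n with
  | zero =>
    intro i table hle hn
    have hK0 : 0 < K := lt_of_lt_of_le (by positivity) hle
    have hleN : 2 ^ i ≤ K.toNat := by
      have := hle
      rw [← pow_cast_int] at this
      omega
    have hiS : i < K.toNat.size := Nat.lt_size.mpr hleN
    have hieq : i = K.toNat.size - 1 := by omega
    have hKlt : K < 2 ^ (i + 1) := by
      have h2 : K.toNat < 2 ^ K.toNat.size := Nat.lt_size_self _
      have h3 : K.toNat.size = i + 1 := by omega
      rw [h3] at h2
      rw [← pow_cast_int]
      omega
    rw [get_kc_loop]
    have hnot : ¬ ((2:Int) ^ i - 1 ≥ K) := by omega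
    simp only [hnot, if_false]
    rw [get_kc_loop]
    have hstop : ((2:Int) ^ (i + 1) - 1 ≥ K) := by omega
    simp only [hstop, if_true]
    simp [hieq]
  | succ m ih =>
    intro i table hle hn
    have hleN : 2 ^ i ≤ K.toNat := by
      have hK0 : 0 < K := lt_of_lt_of_le (by positivity) hle
      have := hle
      rw [← pow_cast_int] at this
      omega
    have hiS : i < K.toNat.size := Nat.lt_size.mpr hleN
    have hi1 : i + 1 < K.toNat.size := by omega
    have hle1 : (2:Int) ^ (i + 1) ≤ K := by
      have h4 : 2 ^ (i + 1) ≤ K.toNat := Nat.lt_size.mp hi1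
      have h5 : ((2 ^ (i+1) : Nat) : Int) ≤ (K.toNat : Int) := by exact_mod_cast h4
      rw [pow_cast_int] at h5
      have hK0 : 0 < K := lt_of_lt_of_le (by positivity) hle
      omega
    rw [get_kc_loop]
    have hnot : ¬ ((2:Int) ^ i - 1 ≥ K) := by omega
    simp only [hnot, if_false]
    exact ih (i + 1) (table ++ [2 ^ i - 1]) hle1 (by omega)

-- ===== VERDICT (by name: the statement is the Claim_ definition above) =====
theorem get_kc_spec : Claim_equal_get_kc := by
  intro K _
  unfold Spec_get_kc get_kc get_kc_alt
  by_cases hK : K < 4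
  · -- first add = 3 >= K: loop returns [1]
    rw [get_kc_loop]
    have hc : ((2:Int) ^ 2 - 1 ≥ K) := by omega
    simp only [hc, if_true, if_pos hK]
    decide
  · have hle : (2:Int) ^ 2 ≤ K := by omega
    have h := get_kc_loop_last K (K.toNat.size - 1 - 2) 2 [1] hle rfl
    rw [PySem.List.pyGet?_neg_one, h, if_neg hK]
    rfl
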